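-- pv_equiv track=rewrite | github.com/ericzundel/history-view-website | scripts/lib/history_db.py | should_skip_blocklisted
-- ===== SOURCE A (Python) =====
-- def should_skip_blocklisted(domain: str, blocklist: set[str] | None) -> bool:
--     if not blocklist:
--         return False
--     parts = domain.split(".")
--     for idx in range(len(parts) - 1):
--         candidate = ".".join(parts[idx:])
--         if candidate in blocklist:
--             return True
--     return False
-- ===== SOURCE B (Python) =====
-- def should_skip_blocklisted(domain: str, blocklist: set[str] | None) -> bool:
--     if blocklist is None:
--         return False
--     for entry in blocklist:
--         # An entry matches exactly when it is a multi-label suffix of the domain.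
--         if "." in entry and (entry == domain or domain.endswith("." + entry)):
--             return True
--     return False
-- ===== Notes on version B (the rewrite author's own statement) =====
-- stated objective: alternative
-- what changed: Instead of splitting the domain and joining every suffix candidate to test set membership, B iterates over the blocklist entries and tests each one directly with an endswith suffix check (an entry matches iff it contains a dot and equals the domain or follows a dot at its end).
import Mathlib
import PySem

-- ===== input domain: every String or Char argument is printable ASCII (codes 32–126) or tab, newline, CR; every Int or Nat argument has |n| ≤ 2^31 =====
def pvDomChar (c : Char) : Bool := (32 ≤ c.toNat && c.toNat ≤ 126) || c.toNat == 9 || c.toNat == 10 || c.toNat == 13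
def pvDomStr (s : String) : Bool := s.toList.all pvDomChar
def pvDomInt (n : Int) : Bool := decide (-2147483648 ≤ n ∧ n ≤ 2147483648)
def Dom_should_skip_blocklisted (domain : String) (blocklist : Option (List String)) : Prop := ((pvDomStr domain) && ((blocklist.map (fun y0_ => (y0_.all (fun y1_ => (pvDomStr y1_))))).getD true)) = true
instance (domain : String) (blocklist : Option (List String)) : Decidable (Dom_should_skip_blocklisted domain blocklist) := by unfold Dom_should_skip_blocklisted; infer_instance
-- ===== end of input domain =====

-- B replaces A's split-and-join candidate generation by a direct per-entry suffix test on the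
-- blocklist (alternative decomposition, same return value on every input).

-- ===== PORT A =====
-- Ported on the List Char carrier (PySem.Chars is the exact layer): domain.split(".") is
-- PySem.Chars.splitOn on domain.toList, ".".join is PySem.Chars.join, and the set-membership
-- test compares the blocklist entries via String.toList (injective, so exact).
def should_skip_blocklisted (domain : String) (blocklist : Option (List String)) : Bool :=
  match blocklist with
  | none => false                                          -- `if not blocklist` (None case)
  | some bl =>
    if bl.isEmpty then false                               -- `if not blocklist` (empty-set case)
    else
      let parts := PySem.Chars.splitOn domain.toList ['.']
      (PySem.List.pyRange 0 ((parts.length : Int) - 1) 1).any (fun idx =>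
        PySem.Set.contains (bl.map String.toList)
          (PySem.Chars.join ['.'] (PySem.List.slice parts (some idx) none)))

-- ===== PORT B =====
def should_skip_blocklisted_alt (domain : String) (blocklist : Option (List String)) : Bool :=
  match blocklist with
  | none => false
  | some bl =>
    bl.any (fun entry =>
      PySem.Chars.isIn ['.'] entry.toList &&
        (entry.toList == domain.toList ||
          PySem.Chars.endswith domain.toList ('.' :: entry.toList)))

-- ===== PRECONDITION & SPEC =====
def Spec_should_skip_blocklisted (domain : String) (blocklist : Option (List String)) (out : Bool) : Prop := out = should_skip_blocklisted_alt domain blocklist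
instance (domain : String) (blocklist : Option (List String)) (out : Bool) : Decidable (Spec_should_skip_blocklisted domain blocklist out) := by unfold Spec_should_skip_blocklisted; infer_instance

-- ===== CLAIM (what is proved, stated in full; the proofs are below) =====
def Claim_equal_should_skip_blocklisted : Prop := ∀ (domain : String) (blocklist : Option (List String)), Dom_should_skip_blocklisted domain blocklist → Spec_should_skip_blocklisted domain blocklist (should_skip_blocklisted domain blocklist)

-- ===== LEMMAS AND PROOFS =====

-- Structural splitter on '.' : pvSdp s = (first part, remaining parts).
def pvSdp : List Char → List Char × List (List Char)
  | [] => ([], [])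
  | c :: r => if c = '.' then ([], (pvSdp r).1 :: (pvSdp r).2) else (c :: (pvSdp r).1, (pvSdp r).2)

-- Structural join with '.'.
def pvJn : List (List Char) → List Char
  | [] => []
  | [a] => a
  | a :: b :: t => a ++ '.' :: pvJn (b :: t)

theorem pvJoin_eq (xs : List (List Char)) : PySem.Chars.join ['.'] xs = pvJn xs := by
  induction xs with
  | nil => simp [PySem.Chars.join, pvJn, List.intercalate]
  | cons a t ih =>
    cases t with
    | nil => simp [PySem.Chars.join, pvJn, List.intercalate]
    | cons b t' =>
      simp only [PySem.Chars.join, List.intercalate, List.intersperse, List.flatten] at ih ⊢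
      simp [pvJn, ← ih]

theorem pvGo_spec (fuel : Nat) : ∀ (l cur : List Char) (acc : List (List Char)),
    l.length ≤ fuel →
    PySem.Chars.splitOn.go ['.'] fuel l cur acc
      = acc.reverse ++ ((cur.reverse ++ (pvSdp l).1) :: (pvSdp l).2) := by
  induction fuel with
  | zero =>
    intro l cur acc h
    have : l = [] := List.length_eq_zero_iff.mp (Nat.le_zero.mp h)
    subst this
    simp [PySem.Chars.splitOn.go.eq_1, pvSdp]
  | succ n ih =>
    intro l cur acc h
    cases l with
    | nil => simp [PySem.Chars.splitOn.go.eq_2, pvSdp]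
    | cons c rest =>
      rw [PySem.Chars.splitOn.go.eq_3]
      by_cases hc : c = '.'
      · subst hc
        have hp : List.isPrefixOf ['.'] ('.' :: rest) = true := by
          simp [List.isPrefixOf]
        rw [if_pos hp]
        simp only [List.length, List.drop]
        rw [ih rest [] (cur.reverse :: acc) (by simpa using Nat.succ_le_succ_iff.mp h)]
        simp [pvSdp]
      · have hp : List.isPrefixOf ['.'] (c :: rest) = false := by
          simp [List.isPrefixOf]
          intro hcontra; exact absurd hcontra.symm hc
        rw [if_neg (by simp [hp])]
        rw [ih rest (c :: cur) acc (by simpa using Nat.succ_le_succ_iff.mp h)]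
        simp [pvSdp, hc]

theorem pvSplitOn_eq (s : List Char) :
    PySem.Chars.splitOn s ['.'] = (pvSdp s).1 :: (pvSdp s).2 := by
  rw [PySem.Chars.splitOn.eq_1, pvGo_spec (s.length + 1) s [] [] (Nat.le_succ _)]
  simp

theorem pvSdp_join (s : List Char) : pvJn ((pvSdp s).1 :: (pvSdp s).2) = s := by
  induction s with
  | nil => simp [pvSdp, pvJn]
  | cons c r ih =>
    by_cases hc : c = '.'
    · subst hc; simp [pvSdp, pvJn, ih]
    · simp only [pvSdp, if_neg hc]
      cases h2 : (pvSdp r).2 with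
      | nil => rw [h2] at ih; simpa [pvJn] using congrArg (c :: ·) ih
      | cons p ps => rw [h2] at ih; simpa [pvJn] using congrArg (c :: ·) ih

theorem pvSdp_nodot (s : List Char) :
    '.' ∉ (pvSdp s).1 ∧ ∀ p ∈ (pvSdp s).2, '.' ∉ p := by
  induction s with
  | nil => simp [pvSdp]
  | cons c r ih =>
    by_cases hc : c = '.'
    · subst hc
      refine ⟨by simp [pvSdp], ?_⟩
      intro p hp
      simp only [pvSdp, if_pos] at hp
      rcases List.mem_cons.mp hp with h | h
      · subst h; exact ih.1
      · exact ih.2 p h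
    · refine ⟨?_, ?_⟩
      · simp only [pvSdp, if_neg hc]
        intro hmem
        rcases List.mem_cons.mp hmem with h | h
        · exact hc h.symm
        · exact ih.1 h
      · simp only [pvSdp, if_neg hc]
        exact ih.2

theorem pvDot_mem_jn (l : List (List Char)) (h : ∀ p ∈ l, '.' ∉ p) :
    ('.' ∈ pvJn l ↔ 2 ≤ l.length) := by
  match l with
  | [] => simp [pvJn]
  | [a] => simp [pvJn]; exact h a (by simp)
  | a :: b :: t => simp [pvJn]

theorem pvSuffix_append (s a m : List Char) :
    s <:+ a ++ m ↔ s <:+ m ∨ ∃ a', a' <:+ a ∧ s = a' ++ m := by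
  constructor
  · intro h
    rcases h with ⟨t, ht⟩
    rcases List.append_eq_append_iff.mp ht with ⟨u, hu1, hu2⟩ | ⟨u, hu1, hu2⟩
    · right; exact ⟨u, ⟨t, hu1.symm⟩, hu2⟩
    · left; exact ⟨u, hu2.symm⟩
  · rintro (⟨t, ht⟩ | ⟨a', ⟨t, ht⟩, rfl⟩)
    · exact ⟨a ++ t, by simp [← ht]⟩
    · exact ⟨t, by simp [← ht]⟩

theorem pvSuffix_jn (l : List (List Char)) (e : List Char) (h : ∀ p ∈ l, '.' ∉ p) :
    (('.' :: e) <:+ pvJn l ↔ ∃ i, 1 ≤ i ∧ i < l.length ∧ e = pvJn (l.drop i)) := by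
  match l with
  | [] =>
    simp [pvJn]
  | [a] =>
    simp only [pvJn]
    constructor
    · intro hs
      exact absurd (hs.subset (by simp)) (h a (by simp))
    · rintro ⟨i, h1, h2, _⟩; simp at h2; omega
  | a :: b :: t =>
    simp only [pvJn]
    rw [pvSuffix_append]
    constructor
    · rintro (hs | ⟨a', ha', heq⟩)
      · -- '.'::e <:+ '.'::pvJn (b::t) : equal or suffix of pvJn (b::t)
        rcases hs with ⟨u, hu⟩
        cases u with
        | nil =>
          simp only [List.nil_append, List.cons.injEq] at hu
          refine ⟨1, le_refl _, by simp, ?_⟩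
          simpa using hu.2
        | cons x u' =>
          have htail : ('.' :: e) <:+ pvJn (b :: t) := by
            have := congrArg List.tail hu
            simp at this
            exact ⟨u', this⟩
          rcases (pvSuffix_jn (b :: t) e (fun p hp => h p (by simp [hp]))).mp htail with
            ⟨i, h1, h2, h3⟩
          refine ⟨i + 1, by omega, ?_, by simpa using h3⟩
          simp only [List.length_cons] at h2 ⊢
          omega
      · -- a' <:+ a forces a' = [] since '.' ∉ a but '.' heads '.'::e = a' ++ '.'::…
        cases a' with
        | nil =>
          simp only [List.nil_append, List.cons.injEq] at heq
          exact ⟨1, le_refl _, by simp, heq.2⟩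
        | cons x a'' =>
          exfalso
          have hx : x = '.' := by
            have hh := congrArg (fun l => l.head?) heq
            simp at hh
            exact hh.symm
          subst hx
          exact h a (by simp) (ha'.subset (by simp))
    · rintro ⟨i, h1, h2, h3⟩
      cases i with
      | zero => omega
      | succ j =>
        cases j with
        | zero =>
          left
          simp only [List.drop_succ_cons, List.drop_zero] at h3
          exact ⟨[], by simp [h3]⟩
        | succ k =>
          left
          have hsuf : ('.' :: e) <:+ pvJn (b :: t) := by
            apply (pvSuffix_jn (b :: t) e (fun p hp => h p (by simp [hp]))).mpr
            refine ⟨k + 1, by omega, ?_, by simpa using h3⟩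
            simp only [List.length_cons] at h2 ⊢
            omega
          rcases hsuf with ⟨u, hu⟩
          exact ⟨'.' :: u, by simp [← hu]⟩

theorem pvMain_iff (l : List (List Char)) (e : List Char) (h : ∀ p ∈ l, '.' ∉ p) :
    ((∃ i : Nat, i + 2 ≤ l.length ∧ e = pvJn (l.drop i)) ↔
      ('.' ∈ e ∧ (e = pvJn l ∨ ('.' :: e) <:+ pvJn l))) := by
  constructor
  · rintro ⟨i, hi, rfl⟩
    have hdrop : ∀ p ∈ l.drop i, '.' ∉ p := fun p hp => h p (List.mem_of_mem_drop hp)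
    have hdot : '.' ∈ pvJn (l.drop i) := by
      rw [pvDot_mem_jn _ hdrop]
      simp; omega
    refine ⟨hdot, ?_⟩
    cases i with
    | zero => left; rfl
    | succ j =>
      right
      exact (pvSuffix_jn l _ h).mpr ⟨j + 1, by omega, by omega, rfl⟩
  · rintro ⟨hdot, (rfl | hsuf)⟩
    · exact ⟨0, by rw [pvDot_mem_jn l h] at hdot; omega, by simp⟩
    · rcases (pvSuffix_jn l e h).mp hsuf with ⟨i, h1, h2, rfl⟩
      have : 2 ≤ (l.drop i).length := by
        rw [← pvDot_mem_jn _ (fun p hp => h p (List.mem_of_mem_drop hp))]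
        exact hdot
      exact ⟨i, by simp at this; omega, rfl⟩

-- ===== VERDICT (by name: the statement is the Claim_ definition above) =====
theorem should_skip_blocklisted_spec : Claim_equal_should_skip_blocklisted := by
  intro domain blocklist _
  unfold Spec_should_skip_blocklisted
  cases blocklist with
  | none => rfl
  | some bl =>
    cases bl with
    | nil => simp [should_skip_blocklisted, should_skip_blocklisted_alt]
    | cons e0 bs =>
      simp only [should_skip_blocklisted, should_skip_blocklisted_alt, List.isEmpty_cons,
        Bool.false_eq_true, if_false]
      rw [Bool.eq_iff_iff]
      rw [List.any_eq_true, List.any_eq_true]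
      rw [pvSplitOn_eq]
      set l := (pvSdp domain.toList).1 :: (pvSdp domain.toList).2 with hl
      have hnodot : ∀ p ∈ l, '.' ∉ p := by
        intro p hp
        rcases List.mem_cons.mp hp with h | h
        · subst h; exact (pvSdp_nodot domain.toList).1
        · exact (pvSdp_nodot domain.toList).2 p h
      have hjoin : pvJn l = domain.toList := pvSdp_join domain.toList
      constructor
      · rintro ⟨idx, hmem, hpred⟩
        rw [PySem.List.mem_pyRange_one] at hmem
        obtain ⟨h0, hlt⟩ := hmem
        rw [PySem.List.slice_from l h0] at hpred
        rw [PySem.Set.contains_iff] at hpred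
        rcases List.mem_map.mp hpred with ⟨entry, hent, hentEq⟩
        refine ⟨entry, hent, ?_⟩
        have hcand : ∃ i : Nat, i + 2 ≤ l.length ∧ entry.toList = pvJn (l.drop i) := by
          refine ⟨idx.toNat, by omega, ?_⟩
          rw [hentEq, pvJoin_eq]
        rcases (pvMain_iff l entry.toList hnodot).mp hcand with ⟨hdot, hcase⟩
        simp only [Bool.and_eq_true, Bool.or_eq_true]
        refine ⟨?_, ?_⟩
        · rw [PySem.Chars.isIn_iff_infix, List.singleton_infix_iff]; exact hdot
        · rcases hcase with h | h
          · left; rw [beq_iff_eq]; rw [h, hjoin]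
          · right; rw [PySem.Chars.endswith_iff]; rw [← hjoin]; exact h
      · rintro ⟨entry, hent, hpred⟩
        simp only [Bool.and_eq_true, Bool.or_eq_true] at hpred
        obtain ⟨hdot', hcase'⟩ := hpred
        have hdot : '.' ∈ entry.toList := by
          rw [PySem.Chars.isIn_iff_infix, List.singleton_infix_iff] at hdot'; exact hdot'
        have hcase : entry.toList = pvJn l ∨ ('.' :: entry.toList) <:+ pvJn l := by
          rcases hcase' with h | h
          · left; rw [beq_iff_eq] at h; rw [h, hjoin]
          · right; rw [PySem.Chars.endswith_iff] at h; rw [hjoin]; exact h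
        rcases (pvMain_iff l entry.toList hnodot).mpr ⟨hdot, hcase⟩ with ⟨i, hi, hieq⟩
        refine ⟨(i : Int), ?_, ?_⟩
        · rw [PySem.List.mem_pyRange_one]
          constructor
          · exact Int.natCast_nonneg i
          · omega
        · rw [PySem.List.slice_from l (Int.natCast_nonneg i)]
          rw [PySem.Set.contains_iff]
          apply List.mem_map.mpr
          exact ⟨entry, hent, by rw [pvJoin_eq]; simpa using hieq⟩
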